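-- pv_equiv track=rewrite | github.com/MrBrantCode/unitest_baseline | mut_generate/mist_train_taco/taco_2113/solution.py | count_number_of_ways
-- ===== SOURCE A (Python) =====
-- MOD = 1000000007
--
-- def binsearch(num, ary):
--     left = 0
--     right = len(ary)
--     while left < right:
--         center = (left + right) // 2
--         if num <= ary[center]:
--             left = center + 1
--         else:
--             right = center
--     return left
--
-- def count_number_of_ways(N, M, A, B):
--     sortA = sorted(A, reverse=True)
--     sortB = sorted(B, reverse=True)
--
--     # Check for duplicates in A and B
--     for i in range(1, N):
--         if sortA[i] == sortA[i - 1]: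
--             return 0
--     for j in range(1, M):
--         if sortB[j] == sortB[j - 1]:
--             return 0
--
--     retval = 1
--     for num in range(N * M, 0, -1):
--         just = 1
--         icandidates = binsearch(num, sortA)
--         jcandidates = binsearch(num, sortB)
--
--         if icandidates >= 1 and sortA[icandidates - 1] == num:
--             icandidates = 1
--             just = 0
--         if jcandidates >= 1 and sortB[jcandidates - 1] == num:
--             jcandidates = 1
--             just = 0
--
--         retval *= icandidates * jcandidates - (N * M - num) * just
--         retval %= MOD
--
--     return retval
-- ===== SOURCE B (Python) =====
-- MOD = 1000000007
--
-- def count_number_of_ways(N, M, A, B):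
--     da = sorted(A, reverse=True)
--     db = sorted(B, reverse=True)
--     if any(da[i] == da[i + 1] for i in range(min(N, len(da)) - 1)):
--         return 0
--     if any(db[j] == db[j + 1] for j in range(min(M, len(db)) - 1)):
--         return 0
--     inA = set(da)
--     inB = set(db)
--     ans = 1
--     pa = 0
--     pb = 0
--     for num in range(N * M, 0, -1):
--         while pa < len(da) and da[pa] >= num:
--             pa += 1
--         while pb < len(db) and db[pb] >= num:
--             pb += 1
--         if num in inA and num in inB:
--             f = 1
--         elif num in inA:
--             f = pb
--         elif num in inB:
--             f = pa
--         else: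
--             f = pa * pb - (N * M - num)
--         ans = ans * f % MOD
--     return ans
-- ===== Notes on version B (the rewrite author's own statement) =====
-- stated objective: alternative
-- what changed: Per-value binary searches are replaced by a single monotone two-pointer sweep carrying running counts (with set membership tests and a direct 4-way case analysis for the per-value factor instead of the icandidates/just sentinel arithmetic), and the duplicate test is a bounded adjacent-pair comprehension over the sorted array instead of an early-returning index loop.
import Mathlib
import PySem

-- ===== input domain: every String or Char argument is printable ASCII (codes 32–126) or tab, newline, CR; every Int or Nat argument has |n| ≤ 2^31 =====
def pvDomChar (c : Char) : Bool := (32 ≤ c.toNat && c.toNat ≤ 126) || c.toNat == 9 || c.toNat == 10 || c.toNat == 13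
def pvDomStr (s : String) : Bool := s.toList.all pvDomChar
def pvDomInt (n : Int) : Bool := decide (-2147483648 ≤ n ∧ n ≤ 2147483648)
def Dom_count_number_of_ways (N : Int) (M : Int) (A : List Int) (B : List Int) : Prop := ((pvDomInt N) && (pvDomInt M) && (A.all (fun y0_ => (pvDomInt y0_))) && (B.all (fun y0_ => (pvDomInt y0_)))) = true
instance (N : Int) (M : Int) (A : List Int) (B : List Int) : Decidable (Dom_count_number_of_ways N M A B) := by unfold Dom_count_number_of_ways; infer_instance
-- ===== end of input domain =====

-- B replaces A's per-value binary searches by a monotone two-pointer sweep with set membership tests; proved equal to A wherever A returns (Pre_ excludes exactly A's IndexError inputs).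


-- ===== PORT A =====
-- module constant MOD = 1000000007 (shared by Source A and Source B)
def pvMOD : Int := 1000000007

-- Python's binsearch while-loop; ary[center] is always in range here (left < right ≤ len(ary)), so getD is exact
def binsearchGo (num : Int) (ary : List Int) (left right : Nat) : Nat :=
  if _h : left < right then
    if num ≤ ary.getD ((left + right) / 2) 0 then binsearchGo num ary ((left + right) / 2 + 1) right
    else binsearchGo num ary left ((left + right) / 2)
  else left
termination_by right - left
decreasing_by all_goals omega

def binsearch (num : Int) (ary : List Int) : Nat := binsearchGo num ary 0 ary.length

-- `for i in range(1, N): if sortA[i] == sortA[i-1]: return 0` — the early-returning scan as a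
-- recursion on i with fuel N.toNat (bounding the remaining iterations)
def dupScan (l : List Int) (N : Int) : Nat → Int → Bool
  | 0, _ => false
  | fuel + 1, i =>
    if i < N then
      if PySem.List.pyGetD l i 0 == PySem.List.pyGetD l (i - 1) 0 then true
      else dupScan l N fuel (i + 1)
    else false

def count_number_of_ways (N : Int) (M : Int) (A : List Int) (B : List Int) : Int :=
  let sortA := PySem.List.sorted A (fun x => x) true
  let sortB := PySem.List.sorted B (fun x => x) true
  if dupScan sortA N N.toNat 1 then 0
  else if dupScan sortB M M.toNat 1 then 0
  else
    (PySem.List.pyRange (N * M) 0 (-1)).foldl (fun retval num =>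
      let ic0 := binsearch num sortA
      let jc0 := binsearch num sortB
      -- (icandidates, just) after the first if; sortA[icandidates-1] guarded by icandidates >= 1
      let ij : Nat × Int := if 1 ≤ ic0 ∧ sortA.getD (ic0 - 1) 0 = num then (1, 0) else (ic0, 1)
      let jj : Nat × Int := if 1 ≤ jc0 ∧ sortB.getD (jc0 - 1) 0 = num then (1, 0) else (jc0, ij.2)
      PySem.Int.mod (retval * ((ij.1 : Int) * (jj.1 : Int) - (N * M - num) * jj.2)) pvMOD) 1

-- ===== PORT B =====
-- Python's `while p < len(l) and l[p] >= num: p += 1` (l[p] in range when tested, so getD is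
-- exact); structural recursion on a fuel that bounds the remaining iterations by len(l)
def advanceGo (num : Int) (l : List Int) : Nat → Nat → Nat
  | 0, p => p
  | fuel + 1, p => if p < l.length ∧ num ≤ l.getD p 0 then advanceGo num l fuel (p + 1) else p

def count_number_of_ways_alt (N : Int) (M : Int) (A : List Int) (B : List Int) : Int :=
  let da := PySem.List.sorted A (fun x => x) true
  let db := PySem.List.sorted B (fun x => x) true
  -- any(da[i] == da[i+1] for i in range(min(N, len(da)) - 1)); indices are always in range
  if (PySem.List.pyRange 0 (min N (da.length : Int) - 1) 1).any
      (fun i => da.getD i.toNat 0 == da.getD (i.toNat + 1) 0) then 0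
  else if (PySem.List.pyRange 0 (min M (db.length : Int) - 1) 1).any
      (fun j => db.getD j.toNat 0 == db.getD (j.toNat + 1) 0) then 0
  else
    let inA := PySem.Set.ofList da
    let inB := PySem.Set.ofList db
    ((PySem.List.pyRange (N * M) 0 (-1)).foldl (fun (st : Int × Nat × Nat) num =>
      let pa := advanceGo num da da.length st.2.1
      let pb := advanceGo num db db.length st.2.2
      let f : Int :=
        if PySem.Set.contains inA num ∧ PySem.Set.contains inB num then 1
        else if PySem.Set.contains inA num then (pb : Int)
        else if PySem.Set.contains inB num then (pa : Int)
        else (pa : Int) * (pb : Int) - (N * M - num)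
      (PySem.Int.mod (st.1 * f) pvMOD, pa, pb)) ((1 : Int), (0 : Nat), (0 : Nat))).1

-- ===== PRECONDITION & SPEC =====
-- Pre_-helper: some duplicate among the n largest values of xs (an adjacent equal pair
-- within the first n entries of the descending sort)
def pvDupTop (xs : List Int) (n : Int) : Bool :=
  (List.range xs.length).any (fun i =>
    decide (i + 1 < xs.length) && decide ((i : Int) + 1 < n) &&
    decide ((PySem.List.sorted xs (fun x => x) true).getD i 0
      = (PySem.List.sorted xs (fun x => x) true).getD (i + 1) 0))

-- Pre_ holds exactly where A returns normally: A raises IndexError when its duplicate scan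
-- reads past the array (N ≥ 2 and N > len(A), resp. M and B) unless a duplicate among the
-- scanned largest values makes it return 0 first (the B-scan only runs if the A-scan passed).
def Pre_count_number_of_ways (N : Int) (M : Int) (A : List Int) (B : List Int) : Prop :=
  (N ≤ (A.length : Int) ∨ N ≤ 1 ∨ pvDupTop A N = true) ∧
  (pvDupTop A N = true ∨ M ≤ (B.length : Int) ∨ M ≤ 1 ∨ pvDupTop B M = true)
instance (N : Int) (M : Int) (A : List Int) (B : List Int) : Decidable (Pre_count_number_of_ways N M A B) := by unfold Pre_count_number_of_ways; infer_instance

def pvWitness_count_number_of_ways : Int × Int × List Int × List Int := (2, 2, [3, 4], [4, 2])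

def Spec_count_number_of_ways (N : Int) (M : Int) (A : List Int) (B : List Int) (out : Int) : Prop := out = count_number_of_ways_alt N M A B
instance (N : Int) (M : Int) (A : List Int) (B : List Int) (out : Int) : Decidable (Spec_count_number_of_ways N M A B out) := by unfold Spec_count_number_of_ways; infer_instance

-- ===== CLAIM (what is proved, stated in full; the proofs are below) =====
def Claim_equal_count_number_of_ways : Prop := ∀ (N : Int) (M : Int) (A : List Int) (B : List Int), Dom_count_number_of_ways N M A B → Pre_count_number_of_ways N M A B → Spec_count_number_of_ways N M A B (count_number_of_ways N M A B)

-- ===== LEMMAS AND PROOFS =====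

-- number of elements ≥ num (for a descending list: length of the ≥-num prefix)
def pvCnt (num : Int) (l : List Int) : Nat := l.countP (fun a => decide (num ≤ a))

def pvDesc (l : List Int) : Prop := l.Pairwise (fun a b => b ≤ a)

theorem pvDesc_getElem {l : List Int} (hd : pvDesc l) {i j : Nat} (hij : i ≤ j) (hj : j < l.length) :
    l[j] ≤ l[i]'(lt_of_le_of_lt hij hj) := by
  rcases Nat.lt_or_ge i j with h | h
  · exact (List.pairwise_iff_getElem.mp hd) i j _ hj h
  · have : i = j := le_antisymm hij h
    subst this; exact le_refl _

theorem pvCnt_le_length (num : Int) (l : List Int) : pvCnt num l ≤ l.length :=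
  List.countP_le_length

theorem pvCnt_spec {num : Int} {l : List Int} (hd : pvDesc l) :
    (∀ k (hk : k < l.length), k < pvCnt num l → num ≤ l[k]) ∧
    (∀ k (hk : k < l.length), pvCnt num l ≤ k → l[k] < num) := by
  induction l with
  | nil => exact ⟨fun k hk _ => absurd hk (by simp), fun k hk _ => absurd hk (by simp)⟩
  | cons x t ih =>
    rw [pvDesc, List.pairwise_cons] at hd
    obtain ⟨hx, ht⟩ := hd
    obtain ⟨ih1, ih2⟩ := ih ht
    by_cases hnx : num ≤ x
    · have hc : pvCnt num (x :: t) = pvCnt num t + 1 := by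
        simp [pvCnt, hnx]
      constructor
      · intro k hk hkc
        cases k with
        | zero => simpa using hnx
        | succ k' =>
          have : k' < pvCnt num t := by omega
          simpa using ih1 k' (by simpa using hk) this
      · intro k hk hkc
        cases k with
        | zero => omega
        | succ k' => simpa using ih2 k' (by simpa using hk) (by omega)
    · have hall : ∀ a ∈ t, a < num := fun a ha =>
        lt_of_le_of_lt (hx a ha) (lt_of_not_ge hnx)
      have hc : pvCnt num (x :: t) = 0 := by
        rw [pvCnt, List.countP_eq_zero]
        intro a ha
        rcases List.mem_cons.mp ha with h | h
        · subst h; simpa using hnx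
        · simpa using not_le.mpr (hall a h)
      constructor
      · intro k hk hkc; omega
      · intro k hk _
        cases k with
        | zero => simpa using lt_of_not_ge hnx
        | succ k' => simpa using hall _ (List.getElem_mem (by simpa using hk))

theorem pvCnt_unique {num : Int} {l : List Int} (hd : pvDesc l) {p : Nat}
    (hp : p ≤ l.length)
    (h1 : ∀ k (hk : k < l.length), k < p → num ≤ l[k])
    (h2 : ∀ k (hk : k < l.length), p ≤ k → l[k] < num) :
    p = pvCnt num l := by
  obtain ⟨s1, s2⟩ := pvCnt_spec (num := num) hd
  rcases lt_trichotomy p (pvCnt num l) with h | h | h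
  · have hlen : p < l.length := lt_of_lt_of_le h (pvCnt_le_length num l)
    have := s1 p hlen h
    have := h2 p hlen le_rfl
    omega
  · exact h
  · have hlen : pvCnt num l < l.length := lt_of_lt_of_le h hp
    have := s2 (pvCnt num l) hlen le_rfl
    have := h1 (pvCnt num l) hlen h
    omega

theorem pvCnt_mono {l : List Int} {m num : Int} (h : m ≤ num) : pvCnt num l ≤ pvCnt m l := by
  apply List.countP_mono_left
  intro a _ ha
  simp only [decide_eq_true_eq] at *
  omega

theorem binsearchGo_eq {num : Int} {l : List Int} (hd : pvDesc l) :
    ∀ fuel left right, right - left ≤ fuel → left ≤ right → right ≤ l.length →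
    (∀ k (hk : k < l.length), k < left → num ≤ l[k]) →
    (∀ k (hk : k < l.length), right ≤ k → l[k] < num) →
    binsearchGo num l left right = pvCnt num l := by
  intro fuel
  induction fuel with
  | zero =>
    intro left right hf hlr hrl h1 h2
    have : left = right := by omega
    subst this
    rw [binsearchGo, dif_neg (by omega)]
    exact pvCnt_unique hd hrl h1 h2
  | succ fuel ih =>
    intro left right hf hlr hrl h1 h2
    by_cases hlt : left < right
    · have hcl : left ≤ (left + right) / 2 := by omega
      have hcr : (left + right) / 2 < right := by omega
      have hclen : (left + right) / 2 < l.length := by omega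
      rw [binsearchGo, dif_pos hlt, List.getD_eq_getElem l 0 hclen]
      by_cases hm : num ≤ l[(left + right) / 2]
      · rw [if_pos hm]
        refine ih _ _ (by omega) (by omega) hrl ?_ h2
        intro k hk hkc
        exact le_trans hm (pvDesc_getElem hd (by omega) hclen)
      · rw [if_neg hm]
        refine ih _ _ (by omega) (by omega) (by omega) h1 ?_
        intro k hk hkc
        exact lt_of_le_of_lt (pvDesc_getElem hd hkc hk) (lt_of_not_ge hm)
    · have : left = right := by omega
      subst this
      rw [binsearchGo, dif_neg (by omega)]
      exact pvCnt_unique hd hrl h1 h2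

theorem binsearch_eq {num : Int} {l : List Int} (hd : pvDesc l) :
    binsearch num l = pvCnt num l := by
  exact binsearchGo_eq hd l.length 0 l.length (by omega) (by omega) le_rfl
    (fun k hk hkc => by omega) (fun k hk hkc => by omega)

theorem advanceGo_eq {num : Int} {l : List Int} (hd : pvDesc l) :
    ∀ fuel p, l.length - p ≤ fuel → p ≤ pvCnt num l → advanceGo num l fuel p = pvCnt num l := by
  obtain ⟨s1, s2⟩ := pvCnt_spec (num := num) hd
  intro fuel
  induction fuel with
  | zero =>
    intro p hf hp
    have hple : pvCnt num l ≤ l.length := pvCnt_le_length num l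
    have : p = pvCnt num l := by omega
    subst this
    rfl
  | succ fuel ih =>
    intro p hf hp
    rcases Nat.lt_or_ge p (pvCnt num l) with h | h
    · have hplen : p < l.length := lt_of_lt_of_le h (pvCnt_le_length num l)
      have hget : num ≤ l.getD p 0 := by
        rw [List.getD_eq_getElem l 0 hplen]; exact s1 p hplen h
      show (if p < l.length ∧ num ≤ l.getD p 0 then advanceGo num l fuel (p + 1) else p) = _
      rw [if_pos ⟨hplen, hget⟩]
      exact ih (p + 1) (by omega) (by omega)
    · have hpe : p = pvCnt num l := by omega
      have hneg : ¬ (p < l.length ∧ num ≤ l.getD p 0) := by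
        rintro ⟨hplen, hge⟩
        rw [List.getD_eq_getElem l 0 hplen] at hge
        have := s2 p hplen (by omega)
        omega
      show (if p < l.length ∧ num ≤ l.getD p 0 then advanceGo num l fuel (p + 1) else p) = _
      rw [if_neg hneg, hpe]

theorem pvMem_iff {num : Int} {l : List Int} (hd : pvDesc l) :
    (1 ≤ pvCnt num l ∧ l.getD (pvCnt num l - 1) 0 = num) ↔ num ∈ l := by
  obtain ⟨s1, s2⟩ := pvCnt_spec (num := num) hd
  have hple : pvCnt num l ≤ l.length := pvCnt_le_length num l
  constructor
  · rintro ⟨h1, h2⟩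
    have hlen : pvCnt num l - 1 < l.length := by omega
    rw [List.getD_eq_getElem l 0 hlen] at h2
    exact h2 ▸ List.getElem_mem hlen
  · intro hm
    obtain ⟨k, hk, hke⟩ := List.mem_iff_getElem.mp hm
    have hklt : k < pvCnt num l := by
      by_contra hc
      exact absurd (s2 k hk (by omega)) (by omega)
    have h1 : 1 ≤ pvCnt num l := by omega
    have hlen : pvCnt num l - 1 < l.length := by omega
    rw [List.getD_eq_getElem l 0 hlen]
    refine ⟨h1, le_antisymm ?_ ?_⟩
    · have hle := pvDesc_getElem hd (i := k) (j := pvCnt num l - 1) (by omega) hlen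
      exact le_trans hle (le_of_eq hke)
    · exact s1 _ hlen (by omega)

-- an adjacent equal pair within the first n entries of the (descending) list l
def pvAdjDup (l : List Int) (n : Int) : Prop :=
  ∃ i : Nat, i + 1 < l.length ∧ ((i : Int) + 1 < n) ∧ l.getD i 0 = l.getD (i + 1) 0

theorem pvDupTop_iff (xs : List Int) (n : Int) :
    pvDupTop xs n = true ↔ pvAdjDup (PySem.List.sorted xs (fun x => x) true) n := by
  rw [pvDupTop, pvAdjDup, List.any_eq_true]
  constructor
  · rintro ⟨i, _hi, hc⟩
    simp only [Bool.and_eq_true, decide_eq_true_eq] at hc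
    exact ⟨i, by rw [PySem.List.length_sorted]; exact hc.1.1, hc.1.2, hc.2⟩
  · rintro ⟨i, h1, h2, he⟩
    rw [PySem.List.length_sorted] at h1
    refine ⟨i, List.mem_range.mpr (by omega), ?_⟩
    simp only [Bool.and_eq_true, decide_eq_true_eq]
    exact ⟨⟨h1, h2⟩, he⟩

-- B's duplicate scan finds exactly an adjacent pair among the first n entries
theorem pvAnyB_iff (l : List Int) (n : Int) :
    ((PySem.List.pyRange 0 (min n (l.length : Int) - 1) 1).any
      (fun i => l.getD i.toNat 0 == l.getD (i.toNat + 1) 0) = true) ↔ pvAdjDup l n := by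
  rw [List.any_eq_true, pvAdjDup]
  constructor
  · rintro ⟨i, hi, he⟩
    rw [PySem.List.mem_pyRange_one] at hi
    rw [beq_iff_eq] at he
    exact ⟨i.toNat, by omega, by omega, he⟩
  · rintro ⟨i, h1, h2, he⟩
    refine ⟨(i : Int), ?_, ?_⟩
    · rw [PySem.List.mem_pyRange_one]; omega
    · rw [beq_iff_eq, Int.toNat_natCast]; exact he
-- A's early-returning scan equals the `any` over range(i, N) when the fuel covers it
theorem pvDupScan_eq_any (l : List Int) (N : Int) :
    ∀ fuel (i : Int), (N - i).toNat ≤ fuel →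
    dupScan l N fuel i
      = ((PySem.List.pyRange i N 1).any
          (fun j => PySem.List.pyGetD l j 0 == PySem.List.pyGetD l (j - 1) 0)) := by
  intro fuel
  induction fuel with
  | zero =>
    intro i hf
    rw [PySem.List.pyRange_one_eq_nil (by omega)]
    rfl
  | succ fuel ih =>
    intro i hf
    by_cases hiN : i < N
    · rw [PySem.List.pyRange_one_cons hiN, List.any_cons]
      show (if i < N then
          if PySem.List.pyGetD l i 0 == PySem.List.pyGetD l (i - 1) 0 then true
          else dupScan l N fuel (i + 1)
        else false) = _
      rw [if_pos hiN]
      cases h : (PySem.List.pyGetD l i 0 == PySem.List.pyGetD l (i - 1) 0) with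
      | true => simp
      | false => simp only [Bool.false_or, if_false, Bool.false_eq_true]
                 exact ih (i + 1) (by omega)
    · rw [PySem.List.pyRange_one_eq_nil (by omega)]
      show (if i < N then _ else false) = _
      rw [if_neg hiN]
      rfl

-- A's duplicate scan finds the same pairs, provided it does not run past the array
-- (n ≤ len, n ≤ 1, or a pair exists so that the scan returns before the overrun)
theorem pvAnyA_iff (l : List Int) (n : Int)
    (h : n ≤ (l.length : Int) ∨ n ≤ 1 ∨ pvAdjDup l n) :
    ((PySem.List.pyRange 1 n 1).any
      (fun i => PySem.List.pyGetD l i 0 == PySem.List.pyGetD l (i - 1) 0) = true) ↔ pvAdjDup l n := by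
  rw [List.any_eq_true, pvAdjDup]
  constructor
  · rintro ⟨i, hi, he⟩
    rw [PySem.List.mem_pyRange_one] at hi
    by_cases hlen : i < (l.length : Int)
    · rw [beq_iff_eq, PySem.List.pyGetD_of_nonneg l (i := i) 0 (by omega),
          PySem.List.pyGetD_of_nonneg l (i := i - 1) 0 (by omega)] at he
      refine ⟨i.toNat - 1, by omega, by omega, ?_⟩
      rw [show (i - 1).toNat = i.toNat - 1 by omega] at he
      rw [show i.toNat - 1 + 1 = i.toNat by omega]
      exact he.symm
    · rcases h with h | h | h
      · omega
      · omega
      · exact h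
  · rintro ⟨i, h1, h2, he⟩
    refine ⟨(i : Int) + 1, ?_, ?_⟩
    · rw [PySem.List.mem_pyRange_one]; omega
    · rw [beq_iff_eq, PySem.List.pyGetD_of_nonneg l (i := (i : Int) + 1) 0 (by omega),
          PySem.List.pyGetD_of_nonneg l (i := (i : Int) + 1 - 1) 0 (by omega),
          show ((i : Int) + 1).toNat = i + 1 by omega,
          show ((i : Int) + 1 - 1).toNat = i by omega]
      exact he.symm

-- the two main loops agree, by induction on the countdown range
theorem pvLoop_eq (NM : Int) (da db : List Int) (hda : pvDesc da) (hdb : pvDesc db) :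
    ∀ (n : Nat) (r : Int) (pa pb : Nat),
    pa ≤ pvCnt (n : Int) da → pb ≤ pvCnt (n : Int) db →
    (((PySem.List.pyRange (n : Int) 0 (-1)).foldl (fun (st : Int × Nat × Nat) num =>
      let pa := advanceGo num da da.length st.2.1
      let pb := advanceGo num db db.length st.2.2
      let f : Int :=
        if PySem.Set.contains (PySem.Set.ofList da) num ∧ PySem.Set.contains (PySem.Set.ofList db) num then 1
        else if PySem.Set.contains (PySem.Set.ofList da) num then (pb : Int)
        else if PySem.Set.contains (PySem.Set.ofList db) num then (pa : Int)
        else (pa : Int) * (pb : Int) - (NM - num)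
      (PySem.Int.mod (st.1 * f) pvMOD, pa, pb)) (r, pa, pb)).1)
    = (PySem.List.pyRange (n : Int) 0 (-1)).foldl (fun retval num =>
      let ic0 := binsearch num da
      let jc0 := binsearch num db
      let ij : Nat × Int := if 1 ≤ ic0 ∧ da.getD (ic0 - 1) 0 = num then (1, 0) else (ic0, 1)
      let jj : Nat × Int := if 1 ≤ jc0 ∧ db.getD (jc0 - 1) 0 = num then (1, 0) else (jc0, ij.2)
      PySem.Int.mod (retval * ((ij.1 : Int) * (jj.1 : Int) - (NM - num) * jj.2)) pvMOD) r := by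
  intro n
  induction n with
  | zero =>
    intro r pa pb hpa hpb
    rw [show ((0 : Nat) : Int) = 0 by norm_num, PySem.List.pyRange_neg_one_eq_nil (by omega)]
    simp
  | succ n ih =>
    intro r pa pb hpa hpb
    have hcons : PySem.List.pyRange ((n + 1 : Nat) : Int) 0 (-1)
        = ((n + 1 : Nat) : Int) :: PySem.List.pyRange ((n : Nat) : Int) 0 (-1) := by
      have he : ((n + 1 : Nat) : Int) - 1 = ((n : Nat) : Int) := by push_cast; ring
      rw [PySem.List.pyRange_neg_one_cons (by push_cast; omega), he]
    set num : Int := ((n + 1 : Nat) : Int) with hnum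
    have hmono_a : pvCnt num da ≤ pvCnt ((n : Nat) : Int) da := pvCnt_mono (by omega)
    have hmono_b : pvCnt num db ≤ pvCnt ((n : Nat) : Int) db := pvCnt_mono (by omega)
    have hadv_a : advanceGo num da da.length pa = pvCnt num da :=
      advanceGo_eq hda da.length pa (by omega) hpa
    have hadv_b : advanceGo num db db.length pb = pvCnt num db :=
      advanceGo_eq hdb db.length pb (by omega) hpb
    have hbs_a : binsearch num da = pvCnt num da := binsearch_eq hda
    have hbs_b : binsearch num db = pvCnt num db := binsearch_eq hdb
    have hcA : PySem.Set.contains (PySem.Set.ofList da) num = true ↔ num ∈ da :=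
      (PySem.Set.contains_iff _ _).trans (PySem.Set.mem_ofList da num)
    have hcB : PySem.Set.contains (PySem.Set.ofList db) num = true ↔ num ∈ db :=
      (PySem.Set.contains_iff _ _).trans (PySem.Set.mem_ofList db num)
    have hmA := pvMem_iff (num := num) hda
    have hmB := pvMem_iff (num := num) hdb
    rw [hcons]
    have hfac :
        (if PySem.Set.contains (PySem.Set.ofList da) num ∧ PySem.Set.contains (PySem.Set.ofList db) num then (1 : Int)
         else if PySem.Set.contains (PySem.Set.ofList da) num then (pvCnt num db : Int)
         else if PySem.Set.contains (PySem.Set.ofList db) num then (pvCnt num da : Int)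
         else (pvCnt num da : Int) * (pvCnt num db : Int) - (NM - num))
        = ((if 1 ≤ pvCnt num da ∧ da.getD (pvCnt num da - 1) 0 = num then ((1 : Nat), (0 : Int)) else (pvCnt num da, 1)).1 : Int)
          * ((if 1 ≤ pvCnt num db ∧ db.getD (pvCnt num db - 1) 0 = num then ((1 : Nat), (0 : Int))
              else (pvCnt num db, (if 1 ≤ pvCnt num da ∧ da.getD (pvCnt num da - 1) 0 = num then ((1 : Nat), (0 : Int)) else (pvCnt num da, 1)).2)).1 : Int)
          - (NM - num) * (if 1 ≤ pvCnt num db ∧ db.getD (pvCnt num db - 1) 0 = num then ((1 : Nat), (0 : Int))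
              else (pvCnt num db, (if 1 ≤ pvCnt num da ∧ da.getD (pvCnt num da - 1) 0 = num then ((1 : Nat), (0 : Int)) else (pvCnt num da, 1)).2)).2 := by
      by_cases hA : num ∈ da <;> by_cases hB : num ∈ db
      · rw [if_pos ⟨hcA.mpr hA, hcB.mpr hB⟩, if_pos (hmA.mpr hA), if_pos (hmB.mpr hB)]
        norm_num
      · rw [if_neg (fun h => hB (hcB.mp h.2)), if_pos (hcA.mpr hA),
            if_pos (hmA.mpr hA), if_neg (fun h => hB (hmB.mp h))]
        norm_num
      · rw [if_neg (fun h => hA (hcA.mp h.1)), if_neg (fun h => hA (hcA.mp h)),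
            if_pos (hcB.mpr hB), if_neg (fun h => hA (hmA.mp h)), if_pos (hmB.mpr hB)]
        norm_num
      · rw [if_neg (fun h => hA (hcA.mp h.1)), if_neg (fun h => hA (hcA.mp h)),
            if_neg (fun h => hB (hcB.mp h)), if_neg (fun h => hA (hmA.mp h)),
            if_neg (fun h => hB (hmB.mp h))]
        push_cast
        ring_nf
    simp only [List.foldl_cons, hadv_a, hadv_b, hbs_a, hbs_b]
    rw [hfac]
    exact ih _ _ _ hmono_a hmono_b

-- ===== VERDICT (by name: the statement is the Claim_ definition above) =====
theorem count_number_of_ways_spec : Claim_equal_count_number_of_ways := by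
  intro N M A B _hdom hpre
  obtain ⟨hp1, hp2⟩ := hpre
  unfold Spec_count_number_of_ways count_number_of_ways count_number_of_ways_alt
  simp only []
  have hda : pvDesc (PySem.List.sorted A (fun x => x) true) :=
    PySem.List.sorted_pairwise_rev A (fun x => x)
  have hdb : pvDesc (PySem.List.sorted B (fun x => x) true) :=
    PySem.List.sorted_pairwise_rev B (fun x => x)
  have hlA : ((PySem.List.sorted A (fun x => x) true).length : Int) = (A.length : Int) := by
    rw [PySem.List.length_sorted]
  have hlB : ((PySem.List.sorted B (fun x => x) true).length : Int) = (B.length : Int) := by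
    rw [PySem.List.length_sorted]
  have hsel1 : N ≤ ((PySem.List.sorted A (fun x => x) true).length : Int) ∨ N ≤ 1 ∨
      pvAdjDup (PySem.List.sorted A (fun x => x) true) N := by
    rw [hlA]
    rcases hp1 with h | h | h
    · exact Or.inl h
    · exact Or.inr (Or.inl h)
    · exact Or.inr (Or.inr ((pvDupTop_iff A N).mp h))
  rw [pvDupScan_eq_any (PySem.List.sorted A (fun x => x) true) N N.toNat 1 (by omega),
      pvDupScan_eq_any (PySem.List.sorted B (fun x => x) true) M M.toNat 1 (by omega)]
  have hA1 := pvAnyA_iff (PySem.List.sorted A (fun x => x) true) N hsel1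
  have hB1 := pvAnyB_iff (PySem.List.sorted A (fun x => x) true) N
  by_cases hd1 : pvAdjDup (PySem.List.sorted A (fun x => x) true) N
  · rw [hA1.mpr hd1, hB1.mpr hd1]
    simp
  · have ha1 : ((PySem.List.pyRange 1 N 1).any
        (fun i => PySem.List.pyGetD (PySem.List.sorted A (fun x => x) true) i 0
          == PySem.List.pyGetD (PySem.List.sorted A (fun x => x) true) (i - 1) 0)) = false :=
      Bool.eq_false_iff.mpr (fun h => hd1 (hA1.mp h))
    have hb1 : ((PySem.List.pyRange 0 (min N ((PySem.List.sorted A (fun x => x) true).length : Int) - 1) 1).any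
        (fun i => (PySem.List.sorted A (fun x => x) true).getD i.toNat 0
          == (PySem.List.sorted A (fun x => x) true).getD (i.toNat + 1) 0)) = false :=
      Bool.eq_false_iff.mpr (fun h => hd1 (hB1.mp h))
    rw [ha1, hb1]
    simp only [Bool.false_eq_true, if_false]
    have hsel2 : M ≤ ((PySem.List.sorted B (fun x => x) true).length : Int) ∨ M ≤ 1 ∨
        pvAdjDup (PySem.List.sorted B (fun x => x) true) M := by
      rw [hlB]
      rcases hp2 with h | h | h | h
      · exact absurd ((pvDupTop_iff A N).mp h) hd1
      · exact Or.inl h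
      · exact Or.inr (Or.inl h)
      · exact Or.inr (Or.inr ((pvDupTop_iff B M).mp h))
    have hA2 := pvAnyA_iff (PySem.List.sorted B (fun x => x) true) M hsel2
    have hB2 := pvAnyB_iff (PySem.List.sorted B (fun x => x) true) M
    by_cases hd2 : pvAdjDup (PySem.List.sorted B (fun x => x) true) M
    · rw [hA2.mpr hd2, hB2.mpr hd2]
      simp
    · have ha2 : ((PySem.List.pyRange 1 M 1).any
          (fun j => PySem.List.pyGetD (PySem.List.sorted B (fun x => x) true) j 0
            == PySem.List.pyGetD (PySem.List.sorted B (fun x => x) true) (j - 1) 0)) = false :=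
        Bool.eq_false_iff.mpr (fun h => hd2 (hA2.mp h))
      have hb2 : ((PySem.List.pyRange 0 (min M ((PySem.List.sorted B (fun x => x) true).length : Int) - 1) 1).any
          (fun j => (PySem.List.sorted B (fun x => x) true).getD j.toNat 0
            == (PySem.List.sorted B (fun x => x) true).getD (j.toNat + 1) 0)) = false :=
        Bool.eq_false_iff.mpr (fun h => hd2 (hB2.mp h))
      rw [ha2, hb2]
      simp only [Bool.false_eq_true, if_false]
      by_cases hnm : 0 ≤ N * M
      · rw [← Int.toNat_of_nonneg hnm]
        exact (pvLoop_eq _ _ _ hda hdb _ 1 0 0 (by omega) (by omega)).symm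
      · rw [PySem.List.pyRange_neg_one_eq_nil (by omega)]
        simp
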